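-- pv_equiv track=rewrite | github.com/Zarifbenalam-1/Jarves | main_old_v1.py | _extract_drive_path
-- ===== SOURCE A (Python) =====
-- def _extract_drive_path(user_input):
--     """Extract drive path from user input"""
--     input_lower = user_input.lower()
--     words = user_input.split()
--
--     # Look for drive specifications
--     for word in words:
--         if word.upper() in ['C:', 'D:', 'E:', 'F:', 'G:', 'H:']:
--             return f"{word.upper()[0]}:/"
--         elif 'drive' in word.lower():
--             # Look for letter before 'drive'
--             for prev_word in words:
--                 if len(prev_word) == 1 and prev_word.upper() in 'CDEFGH':
--                     return f"{prev_word.upper()}:/"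
--             # Default to D drive if just "drive" is mentioned
--             if 'd' in input_lower:
--                 return "D:/"
--
--     return None
-- ===== SOURCE B (Python) =====
-- def _extract_drive_path(user_input):
--     """Extract drive path from user input"""
--     words = user_input.split()
--     # single pass to precompute the first standalone drive letter (fallback)
--     fallback = next((w for w in words if len(w) == 1 and w.upper() in 'CDEFGH'), None)
--     for word in words:
--         wu = word.upper()
--         if wu in ('C:', 'D:', 'E:', 'F:', 'G:', 'H:'):
--             return wu[0] + ":/"
--         if 'drive' in word.lower():
--             return (fallback.upper() + ":/") if fallback is not None else "D:/"
--     return None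
-- ===== Notes on version B (the rewrite author's own statement) =====
-- stated objective: simpler
-- what changed: Replaced the nested rescan of all words inside the drive-mention branch by a precomputed first-match fallback letter plus one linear pass, and dropped the always-true final check that the lowered input contains the letter d (the matched word itself contains it).
import Mathlib
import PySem

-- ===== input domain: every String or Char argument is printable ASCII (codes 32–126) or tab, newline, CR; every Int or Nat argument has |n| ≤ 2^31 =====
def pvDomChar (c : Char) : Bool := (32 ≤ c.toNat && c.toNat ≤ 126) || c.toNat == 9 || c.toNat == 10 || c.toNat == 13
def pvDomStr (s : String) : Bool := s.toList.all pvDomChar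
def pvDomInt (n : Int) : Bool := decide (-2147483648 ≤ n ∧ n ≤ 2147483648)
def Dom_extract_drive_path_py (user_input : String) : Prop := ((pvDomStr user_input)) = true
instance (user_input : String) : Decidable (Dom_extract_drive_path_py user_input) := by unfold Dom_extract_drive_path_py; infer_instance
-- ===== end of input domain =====

-- B replaces A's nested rescan of all words by a precomputed first-match fallback and one
-- linear pass (and drops A's always-true "'d' in input_lower" test); objective: simpler.

-- ===== PORT A =====
-- the six drive specifications ['C:', 'D:', …]
def pvDrives : List String := ["C:", "D:", "E:", "F:", "G:", "H:"]

-- A's inner loop: "for prev_word in words: if len(prev_word)==1 and prev_word.upper() in 'CDEFGH': return f'{prev_word.upper()}:/'"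
def pvAInner : List String → Option String
  | [] => none
  | p :: rest =>
    if (PySem.Str.len p == 1) && PySem.Str.isIn (PySem.Str.upper p) "CDEFGH" then
      some (String.ofList ((PySem.Str.upper p).toList ++ [':', '/']))
    else pvAInner rest

-- A's outer loop over words (input_lower and the full word list stay in scope)
def pvALoop (input_lower : String) (words : List String) : List String → Option String
  | [] => none
  | w :: rest =>
    if PySem.Str.upper w ∈ pvDrives then
      -- f"{word.upper()[0]}:/" ; the indexing cannot fail here (the word is one of the six two-char drives)
      match (PySem.Str.upper w).toList[0]? with
      | some c => some (String.ofList [c, ':', '/'])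
      | none => none
    else if PySem.Str.isIn "drive" (PySem.Str.lower w) then
      match pvAInner words with
      | some r => some r
      | none =>
        if PySem.Str.isIn "d" input_lower then some "D:/"
        else pvALoop input_lower words rest
    else pvALoop input_lower words rest

def extract_drive_path_py (user_input : String) : Option String :=
  let input_lower := PySem.Str.lower user_input
  let words := PySem.Str.split₀ user_input
  pvALoop input_lower words words

-- ===== PORT B =====
-- B's drive tuple ('C:', 'D:', …)
def pvBDrives : List String := ["C:", "D:", "E:", "F:", "G:", "H:"]

-- B's fallback predicate: len(w)==1 and w.upper() in 'CDEFGH'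
def pvBPred (p : String) : Bool :=
  (PySem.Str.len p == 1) && PySem.Str.isIn (PySem.Str.upper p) "CDEFGH"

-- B's single pass, with the fallback already computed
def pvBLoop (fallback : Option String) : List String → Option String
  | [] => none
  | w :: rest =>
    let wu := PySem.Str.upper w
    if wu ∈ pvBDrives then
      -- wu[0] + ":/"
      match wu.toList[0]? with
      | some c => some (String.ofList [c, ':', '/'])
      | none => none
    else if PySem.Str.isIn "drive" (PySem.Str.lower w) then
      match fallback with
      | some p => some (String.ofList ((PySem.Str.upper p).toList ++ [':', '/']))
      | none => some "D:/"
    else pvBLoop fallback rest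

def extract_drive_path_py_alt (user_input : String) : Option String :=
  let words := PySem.Str.split₀ user_input
  let fallback := words.find? pvBPred
  pvBLoop fallback words

-- ===== PRECONDITION & SPEC =====
def Spec_extract_drive_path_py (user_input : String) (out : Option String) : Prop := out = extract_drive_path_py_alt user_input
instance (user_input : String) (out : Option String) : Decidable (Spec_extract_drive_path_py user_input out) := by unfold Spec_extract_drive_path_py; infer_instance

-- ===== CLAIM (what is proved, stated in full; the proofs are below) =====
def Claim_equal_extract_drive_path_py : Prop := ∀ (user_input : String), Dom_extract_drive_path_py user_input → Spec_extract_drive_path_py user_input (extract_drive_path_py user_input)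

-- ===== LEMMAS AND PROOFS =====

-- A's inner loop is exactly the first fallback word, formatted
theorem pvAInner_eq_find (ws : List String) :
    pvAInner ws = (ws.find? pvBPred).map (fun p => String.ofList ((PySem.Str.upper p).toList ++ [':', '/'])) := by
  induction ws with
  | nil => rfl
  | cons p rest ih =>
    cases h : ((PySem.Str.len p == 1) && PySem.Str.isIn (PySem.Str.upper p) "CDEFGH") with
    | true => simp only [pvAInner, List.find?, pvBPred, h, if_true, Option.map_some]
    | false =>
      simp only [pvAInner, List.find?, pvBPred, h, Bool.false_eq_true, if_false]
      exact ih

-- every word produced by split₀ is an infix of the original character list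
theorem pvSplit₀_go_mem (rest cur : List Char) (acc : List (List Char)) (w : List Char)
    (hw : w ∈ PySem.Chars.split₀.go rest cur acc) :
    w ∈ acc ∨ (∃ t, t <+: rest ∧ w = cur.reverse ++ t) ∨ w <:+: rest := by
  induction rest generalizing cur acc with
  | nil =>
    unfold PySem.Chars.split₀.go at hw
    by_cases hc : cur.isEmpty = true
    · simp [hc] at hw
      exact Or.inl hw
    · simp [hc] at hw
      rcases hw with h | h
      · exact Or.inl h
      · exact Or.inr (Or.inl ⟨[], List.nil_prefix, by simp [h]⟩)
  | cons c rest ih =>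
    unfold PySem.Chars.split₀.go at hw
    by_cases hs : PySem.Chars.isspace c = true
    · rw [if_pos hs] at hw
      by_cases hc : cur.isEmpty = true
      · rw [if_pos hc] at hw
        rcases ih [] acc hw with h | ⟨t, ht, hwt⟩ | h
        · exact Or.inl h
        · simp only [List.reverse_nil, List.nil_append] at hwt
          exact Or.inr (Or.inr (hwt ▸ (ht.isInfix.trans (List.suffix_cons c rest).isInfix)))
        · exact Or.inr (Or.inr (h.trans (List.suffix_cons c rest).isInfix))
      · rw [if_neg hc] at hw
        rcases ih [] (cur.reverse :: acc) hw with h | ⟨t, ht, hwt⟩ | h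
        · rcases List.mem_cons.mp h with h | h
          · exact Or.inr (Or.inl ⟨[], List.nil_prefix, by simp [h]⟩)
          · exact Or.inl h
        · refine Or.inr (Or.inr ?_)
          simp only [List.reverse_nil, List.nil_append] at hwt
          exact hwt ▸ (ht.isInfix.trans (List.suffix_cons c rest).isInfix)
        · exact Or.inr (Or.inr (h.trans (List.suffix_cons c rest).isInfix))
    · rw [if_neg hs] at hw
      rcases ih (c :: cur) acc hw with h | ⟨t, ht, hwt⟩ | h
      · exact Or.inl h
      · refine Or.inr (Or.inl ⟨c :: t, ?_, ?_⟩)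
        · exact (List.prefix_cons_inj c).mpr ht
        · simpa using hwt
      · exact Or.inr (Or.inr (h.trans (List.suffix_cons c rest).isInfix))

theorem pvMem_split₀_infix (s w : List Char) (hw : w ∈ PySem.Chars.split₀ s) : w <:+: s := by
  rcases pvSplit₀_go_mem s [] [] w hw with h | ⟨t, ht, hwt⟩ | h
  · simp at h
  · simpa [hwt] using ht.isInfix
  · exact h

-- if some word of the input contains 'drive', the lowered input contains 'd'
theorem pvD_in_lower (s w : String) (hw : w ∈ PySem.Str.split₀ s)
    (hd : PySem.Str.isIn "drive" (PySem.Str.lower w) = true) :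
    PySem.Str.isIn "d" (PySem.Str.lower s) = true := by
  have hwl : w.toList ∈ PySem.Chars.split₀ s.toList := by
    have := PySem.Str.split₀_map_toList s
    rw [← this]
    exact List.mem_map_of_mem hw
  have hinf : w.toList <:+: s.toList := pvMem_split₀_infix _ _ hwl
  have h1 : "drive".toList <:+: (PySem.Str.lower w).toList := (PySem.Str.isIn_iff_infix _ _).mp hd
  rw [PySem.Str.toList_lower] at h1
  have h2 : ['d'] <:+: "drive".toList := ⟨[], ['r','i','v','e'], rfl⟩
  have h3 : ['d'] <:+: PySem.Chars.lower w.toList := h2.trans h1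
  have h4 : PySem.Chars.lower w.toList <:+: PySem.Chars.lower s.toList := by
    simpa [PySem.Chars.lower] using hinf.map PySem.Chars.lowerChar
  rw [PySem.Str.isIn_iff_infix, PySem.Str.toList_lower]
  exact h3.trans h4

-- the two loops agree on every suffix of the word list
theorem pvLoop_eq (s : String) (ws : List String)
    (hws : ∀ w ∈ ws, w ∈ PySem.Str.split₀ s) :
    pvALoop (PySem.Str.lower s) (PySem.Str.split₀ s) ws
      = pvBLoop ((PySem.Str.split₀ s).find? pvBPred) ws := by
  induction ws with
  | nil => rfl
  | cons w rest ih =>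
    have hw : w ∈ PySem.Str.split₀ s := hws w (List.mem_cons_self ..)
    have hrest : ∀ x ∈ rest, x ∈ PySem.Str.split₀ s := fun x hx => hws x (List.mem_cons_of_mem _ hx)
    have hdr : (PySem.Str.upper w ∈ pvBDrives) ↔ (PySem.Str.upper w ∈ pvDrives) := Iff.rfl
    simp only [pvALoop, pvBLoop, hdr]
    by_cases h1 : PySem.Str.upper w ∈ pvDrives
    · rw [if_pos h1, if_pos h1]
    · rw [if_neg h1, if_neg h1]
      by_cases h2 : PySem.Str.isIn "drive" (PySem.Str.lower w) = true
      · rw [if_pos h2, if_pos h2, pvAInner_eq_find]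
        cases hf : (PySem.Str.split₀ s).find? pvBPred with
        | some p => simp
        | none =>
          simp only [Option.map_none]
          rw [if_pos (pvD_in_lower s w hw h2)]
      · rw [if_neg h2, if_neg h2]
        exact ih hrest

-- ===== VERDICT (by name: the statement is the Claim_ definition above) =====
theorem extract_drive_path_py_spec : Claim_equal_extract_drive_path_py := by
  intro s _
  unfold Spec_extract_drive_path_py extract_drive_path_py extract_drive_path_py_alt
  exact pvLoop_eq s (PySem.Str.split₀ s) (fun _ h => h)
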